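-- pv_equiv track=rewrite | github.com/ignaziomirto2017/nlpytaly | nlpytaly/operazioni/formazioni/formazione_infinito.py | formazione_infinito
-- ===== SOURCE A (Python) =====
-- def formazione_infinito(o: str) -> str:  # o = occorrenza
--     """
--     >>> formazione_infinito("arrestato")
--     'arrestare'
--     >>> formazione_infinito("compianto")
--     'compiangere'
--     >>> formazione_infinito("amato")
--     'amare'
--     >>> formazione_infinito("mangiato")
--     'mangiare'
--     >>> formazione_infinito("visti")
--     'vedere'
--     >>> formazione_infinito("partito")
--     'partire'
--     >>> formazione_infinito("parte")
--     'partire'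
--     """
--     rules = [
--         ("parte", 1, "ire"),
--         ("stato", 2, "re"),
--         ("stata", 2, "re"),
--         ("stati", 2, "re"),
--         ("state", 2, "re"),
--         ("isto", 4, "edere"),
--         ("isti", 4, "edere"),
--         ("dato", 2, "re"),
--         ("data", 2, "re"),
--         ("dati", 2, "re"),
--         ("date", 2, "re"),
--         ("nto", 2, "gere"),
--         ("nno", 3, "re"),
--         ("ito", 2, "re"),
--         ("ato", 2, "re"),
--         ("ggi", 0, "are"),
--         ("hi", 2, "are"),
--         ("i", 1, "are"),
--         ("e", 1, "ere"),
--         ("o", 1, "are"),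
--         ("a", 1, "are"),
--     ]
--     # rules = sorted(rules, reverse=True, key=lambda x: len(x[0]))
--     for r in rules:
--         if o.endswith(r[0]):
--             if r[1] == 0:
--                 return o + r[2]
--             else:
--                 return o[: -r[1]] + r[2]
--     return ""
-- ===== SOURCE B (Python) =====
-- def _stem(o, cut):
--     return o[:len(o) - cut]
--
--
-- def formazione_infinito(o: str) -> str:
--     # Decision tree over the reversed word: dispatch on the final letter,
--     # then probe the few reversed suffixes possible under that letter.
--     r = o[::-1]
--     if not r:
--         return ""
--     c = r[0]
--     if c == "e":
--         if r.startswith("etrap"):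
--             return _stem(o, 1) + "ire"
--         if r.startswith("etats") or r.startswith("etad"):
--             return _stem(o, 2) + "re"
--         return _stem(o, 1) + "ere"
--     if c == "o":
--         if r.startswith("otsi"):
--             return _stem(o, 4) + "edere"
--         if r.startswith("otn"):
--             return _stem(o, 2) + "gere"
--         if r.startswith("onn"):
--             return _stem(o, 3) + "re"
--         if r.startswith("oti") or r.startswith("ota"):
--             return _stem(o, 2) + "re"
--         return _stem(o, 1) + "are"
--     if c == "a":
--         if r.startswith("atats") or r.startswith("atad"):
--             return _stem(o, 2) + "re"
--         return _stem(o, 1) + "are"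
--     if c == "i":
--         if r.startswith("itsi"):
--             return _stem(o, 4) + "edere"
--         if r.startswith("itats") or r.startswith("itad"):
--             return _stem(o, 2) + "re"
--         if r.startswith("igg"):
--             return o + "are"
--         if r.startswith("ih"):
--             return _stem(o, 2) + "are"
--         return _stem(o, 1) + "are"
--     return ""
-- ===== Notes on version B (the rewrite author's own statement) =====
-- stated objective: alternative
-- what changed: Replaced the linear scan over 21 endswith rules by a decision tree on the reversed word: dispatch once on the final letter, then probe only the few reversed suffixes possible under that letter (overlapping rules with equal outcomes folded together), with the same result on every input.
import Mathlib
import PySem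

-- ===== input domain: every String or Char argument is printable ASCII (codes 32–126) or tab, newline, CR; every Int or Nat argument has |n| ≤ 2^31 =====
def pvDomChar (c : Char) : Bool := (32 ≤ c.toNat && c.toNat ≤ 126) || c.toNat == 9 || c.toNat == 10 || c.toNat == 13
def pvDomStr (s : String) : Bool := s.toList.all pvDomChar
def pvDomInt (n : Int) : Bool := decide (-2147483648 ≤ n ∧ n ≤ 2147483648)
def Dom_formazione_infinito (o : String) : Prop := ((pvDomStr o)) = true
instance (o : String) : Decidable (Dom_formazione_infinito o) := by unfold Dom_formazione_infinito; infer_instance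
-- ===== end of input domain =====

-- B replaces A's linear scan over 21 endswith rules by a decision tree on the reversed word:
-- one dispatch on the final letter, then at most five reversed-suffix probes (objective: alternative).

-- ===== PORT A =====

def fiRules : List (List Char × Int × List Char) :=
  [(['p', 'a', 'r', 't', 'e'], 1, ['i', 'r', 'e']),
   (['s', 't', 'a', 't', 'o'], 2, ['r', 'e']),
   (['s', 't', 'a', 't', 'a'], 2, ['r', 'e']),
   (['s', 't', 'a', 't', 'i'], 2, ['r', 'e']),
   (['s', 't', 'a', 't', 'e'], 2, ['r', 'e']),
   (['i', 's', 't', 'o'], 4, ['e', 'd', 'e', 'r', 'e']),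
   (['i', 's', 't', 'i'], 4, ['e', 'd', 'e', 'r', 'e']),
   (['d', 'a', 't', 'o'], 2, ['r', 'e']),
   (['d', 'a', 't', 'a'], 2, ['r', 'e']),
   (['d', 'a', 't', 'i'], 2, ['r', 'e']),
   (['d', 'a', 't', 'e'], 2, ['r', 'e']),
   (['n', 't', 'o'], 2, ['g', 'e', 'r', 'e']),
   (['n', 'n', 'o'], 3, ['r', 'e']),
   (['i', 't', 'o'], 2, ['r', 'e']),
   (['a', 't', 'o'], 2, ['r', 'e']),
   (['g', 'g', 'i'], 0, ['a', 'r', 'e']),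
   (['h', 'i'], 2, ['a', 'r', 'e']),
   (['i'], 1, ['a', 'r', 'e']),
   (['e'], 1, ['e', 'r', 'e']),
   (['o'], 1, ['a', 'r', 'e']),
   (['a'], 1, ['a', 'r', 'e'])]

def fiLoop : List (List Char × Int × List Char) → List Char → List Char
  | [], _ => []
  | (suf, cut, add) :: rest, s =>
    if PySem.Chars.endswith s suf then
      if cut == 0 then s ++ add else PySem.List.slice s none (some (-cut)) ++ add
    else fiLoop rest s

def formazione_infinito (o : String) : String := String.ofList (fiLoop fiRules o.toList)


-- ===== PORT B =====

-- o[:len(o)-cut]; at every call site of Source B the just-matched suffix guarantees cut ≤ len(o),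
-- so Python's o[:len(o)-cut] is exactly List.take (len - cut).
def fiStem (s : List Char) (cut : Nat) : List Char := List.take (s.length - cut) s

def fiTree (s : List Char) : List Char :=
  match s.reverse with
  | [] => []
  | c :: _ =>
    let r := s.reverse
    if c == 'e' then
      if PySem.Chars.startswith r ['e', 't', 'r', 'a', 'p'] then fiStem s 1 ++ ['i', 'r', 'e']
      else if PySem.Chars.startswith r ['e', 't', 'a', 't', 's'] || PySem.Chars.startswith r ['e', 't', 'a', 'd'] then fiStem s 2 ++ ['r', 'e']
      else fiStem s 1 ++ ['e', 'r', 'e']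
    else if c == 'o' then
      if PySem.Chars.startswith r ['o', 't', 's', 'i'] then fiStem s 4 ++ ['e', 'd', 'e', 'r', 'e']
      else if PySem.Chars.startswith r ['o', 't', 'n'] then fiStem s 2 ++ ['g', 'e', 'r', 'e']
      else if PySem.Chars.startswith r ['o', 'n', 'n'] then fiStem s 3 ++ ['r', 'e']
      else if PySem.Chars.startswith r ['o', 't', 'i'] || PySem.Chars.startswith r ['o', 't', 'a'] then fiStem s 2 ++ ['r', 'e']
      else fiStem s 1 ++ ['a', 'r', 'e']
    else if c == 'a' then
      if PySem.Chars.startswith r ['a', 't', 'a', 't', 's'] || PySem.Chars.startswith r ['a', 't', 'a', 'd'] then fiStem s 2 ++ ['r', 'e']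
      else fiStem s 1 ++ ['a', 'r', 'e']
    else if c == 'i' then
      if PySem.Chars.startswith r ['i', 't', 's', 'i'] then fiStem s 4 ++ ['e', 'd', 'e', 'r', 'e']
      else if PySem.Chars.startswith r ['i', 't', 'a', 't', 's'] || PySem.Chars.startswith r ['i', 't', 'a', 'd'] then fiStem s 2 ++ ['r', 'e']
      else if PySem.Chars.startswith r ['i', 'g', 'g'] then s ++ ['a', 'r', 'e']
      else if PySem.Chars.startswith r ['i', 'h'] then fiStem s 2 ++ ['a', 'r', 'e']
      else fiStem s 1 ++ ['a', 'r', 'e']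
    else []

def formazione_infinito_alt (o : String) : String := String.ofList (fiTree o.toList)


-- ===== PRECONDITION & SPEC =====
def Spec_formazione_infinito (o : String) (out : String) : Prop := out = formazione_infinito_alt o
instance (o : String) (out : String) : Decidable (Spec_formazione_infinito o out) := by unfold Spec_formazione_infinito; infer_instance

-- ===== CLAIM (what is proved, stated in full; the proofs are below) =====
def Claim_equal_formazione_infinito : Prop := ∀ (o : String), Dom_formazione_infinito o → Spec_formazione_infinito o (formazione_infinito o)

-- ===== LEMMAS AND PROOFS =====

theorem isP_nil (s : List Char) : List.isPrefixOf ([] : List Char) s = true := by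
  cases s <;> rfl

theorem isP_cons_nil (x : Char) (l : List Char) : List.isPrefixOf (x :: l) ([] : List Char) = false := rfl

theorem isP_cons_cons (x c : Char) (l t : List Char) :
    List.isPrefixOf (x :: l) (c :: t) = ((c = x) && List.isPrefixOf l t) := by
  by_cases h : c = x
  · subst h; simp [List.isPrefixOf]
  · simp only [List.isPrefixOf, decide_eq_false h, Bool.false_and]
    rw [Bool.eq_iff_iff]
    simp only [Bool.and_eq_true, beq_iff_eq, Bool.false_eq_true, iff_false, not_and]
    intro e; exact absurd e.symm h

theorem endswith_rev (r l : List Char) :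
    PySem.Chars.endswith r.reverse l = PySem.Chars.startswith r l.reverse := by
  rw [Bool.eq_iff_iff, PySem.Chars.endswith_iff, PySem.Chars.startswith_iff,
    ← List.reverse_reverse l, List.reverse_suffix, List.reverse_reverse]

set_option maxHeartbeats 4000000 in
theorem fi_key (r : List Char) : fiLoop fiRules r.reverse = fiTree r.reverse := by
  have h1 : PySem.List.slice r.reverse none (some (-1)) = List.take (r.reverse.length - 1) r.reverse := by
    rw [PySem.List.slice_to_neg_one, List.dropLast_eq_take]
  have h2 := PySem.List.slice_to_neg_ofNat r.reverse 2 (by omega)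
  have h3 := PySem.List.slice_to_neg_ofNat r.reverse 3 (by omega)
  have h4 := PySem.List.slice_to_neg_ofNat r.reverse 4 (by omega)
  simp only [fiRules, fiLoop, fiTree, fiStem, List.reverse_reverse, endswith_rev,
    List.reverse_cons, List.reverse_nil, List.nil_append, List.cons_append,
    h1, h2, h3, h4]
  clear h1 h2 h3 h4
  match r with
  | [] => rfl
  | [c1] =>
    simp only [PySem.Chars.startswith, isP_nil, isP_cons_nil, isP_cons_cons,
      List.reverse_cons, List.reverse_nil, List.nil_append, List.cons_append,
      Bool.and_true, Bool.and_false, Bool.false_and, Bool.true_and,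
      Bool.or_eq_true, Bool.and_eq_true, decide_eq_true_eq, beq_iff_eq,
      Bool.false_eq_true, if_false, if_true, or_self, false_or, or_false,
      List.length_cons, List.length_nil, Nat.reduceAdd, Nat.reduceSub,
      Int.reduceEq, Nat.reduceEqDiff, List.take_succ_cons, List.take_zero, ite_self]
    by_cases h1 : c1 = 'e' <;> by_cases h2 : c1 = 'o' <;> by_cases h3 : c1 = 'a' <;> by_cases h4 : c1 = 'i' <;>
      first | rfl | ((simp_all; try (split_ifs <;> simp_all)) <;> try tauto)
  | [c1, c2] =>
    simp only [PySem.Chars.startswith, isP_nil, isP_cons_nil, isP_cons_cons,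
      List.reverse_cons, List.reverse_nil, List.nil_append, List.cons_append,
      Bool.and_true, Bool.and_false, Bool.false_and, Bool.true_and,
      Bool.or_eq_true, Bool.and_eq_true, decide_eq_true_eq, beq_iff_eq,
      Bool.false_eq_true, if_false, if_true, or_self, false_or, or_false,
      List.length_cons, List.length_nil, Nat.reduceAdd, Nat.reduceSub,
      Int.reduceEq, Nat.reduceEqDiff, List.take_succ_cons, List.take_zero, ite_self]
    by_cases h1 : c1 = 'e' <;> by_cases h2 : c1 = 'o' <;> by_cases h3 : c1 = 'a' <;> by_cases h4 : c1 = 'i' <;>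
      first | rfl | ((simp_all; try (split_ifs <;> simp_all)) <;> try tauto)
  | [c1, c2, c3] =>
    simp only [PySem.Chars.startswith, isP_nil, isP_cons_nil, isP_cons_cons,
      List.reverse_cons, List.reverse_nil, List.nil_append, List.cons_append,
      Bool.and_true, Bool.and_false, Bool.false_and, Bool.true_and,
      Bool.or_eq_true, Bool.and_eq_true, decide_eq_true_eq, beq_iff_eq,
      Bool.false_eq_true, if_false, if_true, or_self, false_or, or_false,
      List.length_cons, List.length_nil, Nat.reduceAdd, Nat.reduceSub,
      Int.reduceEq, Nat.reduceEqDiff, List.take_succ_cons, List.take_zero, ite_self]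
    by_cases h1 : c1 = 'e' <;> by_cases h2 : c1 = 'o' <;> by_cases h3 : c1 = 'a' <;> by_cases h4 : c1 = 'i' <;>
      first | rfl | ((simp_all; try (split_ifs <;> simp_all)) <;> try tauto)
  | [c1, c2, c3, c4] =>
    simp only [PySem.Chars.startswith, isP_nil, isP_cons_nil, isP_cons_cons,
      List.reverse_cons, List.reverse_nil, List.nil_append, List.cons_append,
      Bool.and_true, Bool.and_false, Bool.false_and, Bool.true_and,
      Bool.or_eq_true, Bool.and_eq_true, decide_eq_true_eq, beq_iff_eq,
      Bool.false_eq_true, if_false, if_true, or_self, false_or, or_false,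
      List.length_cons, List.length_nil, Nat.reduceAdd, Nat.reduceSub,
      Int.reduceEq, Nat.reduceEqDiff, List.take_succ_cons, List.take_zero, ite_self]
    by_cases h1 : c1 = 'e' <;> by_cases h2 : c1 = 'o' <;> by_cases h3 : c1 = 'a' <;> by_cases h4 : c1 = 'i' <;>
      first | rfl | ((simp_all; try (split_ifs <;> simp_all)) <;> try tauto)
  | c1 :: c2 :: c3 :: c4 :: c5 :: u =>
    simp only [PySem.Chars.startswith, isP_nil, isP_cons_nil, isP_cons_cons,
      List.reverse_cons, List.reverse_nil, List.nil_append, List.cons_append,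
      Bool.and_true, Bool.and_false, Bool.false_and, Bool.true_and,
      Bool.or_eq_true, Bool.and_eq_true, decide_eq_true_eq, beq_iff_eq,
      Bool.false_eq_true, if_false, if_true, or_self, false_or, or_false,
      List.length_cons, List.length_nil, Nat.reduceAdd, Nat.reduceSub,
      Int.reduceEq, Nat.reduceEqDiff, List.take_succ_cons, List.take_zero, ite_self]
    by_cases h1 : c1 = 'e' <;> by_cases h2 : c1 = 'o' <;> by_cases h3 : c1 = 'a' <;> by_cases h4 : c1 = 'i' <;>
      first | rfl | ((simp_all; try (split_ifs <;> simp_all)) <;> try tauto)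

-- ===== VERDICT (by name: the statement is the Claim_ definition above) =====
theorem formazione_infinito_spec : Claim_equal_formazione_infinito := by
  intro o _
  unfold Spec_formazione_infinito formazione_infinito formazione_infinito_alt
  have := fi_key o.toList.reverse
  rw [List.reverse_reverse] at this
  exact congrArg String.ofList this
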